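-- pv_equiv track=rewrite | github.com/20211938/IoT_FL_AM | util_dataset/cleanup_dataset.py | extract_defect_types_from_metadata
-- ===== SOURCE A (Python) =====
-- from typing import Dict, List, Optional
--
-- def extract_defect_types_from_metadata(metadata: dict) -> List[str]:
--     """JSON 메타데이터에서 결함 유형 추출"""
--     defect_types = []
--
--     # TagBoxes에서 결함 정보 추출
--     if 'DepositionImageModel' in metadata:
--         tag_boxes = metadata['DepositionImageModel'].get('TagBoxes', [])
--         for tag in tag_boxes:
--             name = tag.get('Name', '').strip()
--             comment = tag.get('Comment', '').strip()
--             if name: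
--                 defect_type = comment if comment else name
--                 if defect_type and defect_type not in defect_types:
--                     defect_types.append(defect_type)
--
--     if 'ScanningImageModel' in metadata:
--         tag_boxes = metadata['ScanningImageModel'].get('TagBoxes', [])
--         for tag in tag_boxes:
--             name = tag.get('Name', '').strip()
--             comment = tag.get('Comment', '').strip()
--             if name:
--                 defect_type = comment if comment else name
--                 if defect_type and defect_type not in defect_types:
--                     defect_types.append(defect_type)
--
--     return defect_types if defect_types else ["Normal"]
-- ===== SOURCE B (Python) =====
-- def extract_defect_types_from_metadata(metadata: dict):
--     """JSON 메타데이터에서 결함 유형 추출"""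
--     def candidates(models):
--         # recursively gather comment-or-name values across the given models
--         if not models:
--             return []
--         tags = metadata.get(models[0], {}).get('TagBoxes', [])
--         here = [tag.get('Comment', '').strip() or tag.get('Name', '').strip()
--                 for tag in tags if tag.get('Name', '').strip()]
--         return here + candidates(models[1:])
--
--     def uniq(xs):
--         # sieve-style dedup: keep the head, remove all its later copies, recurse
--         if not xs:
--             return []
--         return [xs[0]] + uniq([y for y in xs[1:] if y != xs[0]])
--
--     result = uniq(candidates(['DepositionImageModel', 'ScanningImageModel']))
--     return result if result else ["Normal"]
-- ===== Notes on version B (the rewrite author's own statement) =====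
-- stated objective: alternative
-- what changed: Replaces A's two copy-pasted loops that dedup inline by membership-testing the growing result with a recursive gather over the model-name list (list comprehension per model) followed by a sieve-style recursive dedup that keeps each head and filters its later copies out of the remainder.
import Mathlib
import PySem

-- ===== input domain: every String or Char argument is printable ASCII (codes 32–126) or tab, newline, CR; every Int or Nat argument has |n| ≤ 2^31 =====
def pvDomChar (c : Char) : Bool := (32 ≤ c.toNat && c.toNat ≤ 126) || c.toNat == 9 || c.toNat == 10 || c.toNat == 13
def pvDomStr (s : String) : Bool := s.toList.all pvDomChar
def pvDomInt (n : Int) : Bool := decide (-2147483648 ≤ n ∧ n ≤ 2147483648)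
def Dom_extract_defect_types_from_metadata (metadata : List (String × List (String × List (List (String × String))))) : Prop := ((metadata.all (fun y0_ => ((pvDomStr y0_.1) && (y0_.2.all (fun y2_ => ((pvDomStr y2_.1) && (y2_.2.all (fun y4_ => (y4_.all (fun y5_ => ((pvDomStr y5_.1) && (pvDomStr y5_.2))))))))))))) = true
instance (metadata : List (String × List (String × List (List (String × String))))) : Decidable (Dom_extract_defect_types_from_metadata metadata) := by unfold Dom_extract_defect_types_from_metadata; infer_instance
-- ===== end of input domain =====

-- B replaces A's two copy-pasted scan-with-inline-dedup loops by a recursive gather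
-- over the model-name list followed by a sieve-style recursive dedup (alternative).

-- dict primitive shared by both ports: first-match association-list lookup (d.get / 'in' / d[k])
def pvLookup? {β : Type} (d : List (String × β)) (k : String) : Option β :=
  (d.find? (fun p => p.1 == k)).map (·.2)

-- ===== PORT A =====
def extract_defect_types_from_metadata (metadata : List (String × List (String × List (List (String × String))))) : List String :=
  let defect_types : List String := []
  let defect_types :=
    if (pvLookup? metadata "DepositionImageModel").isSome then
      let tag_boxes := (pvLookup? ((pvLookup? metadata "DepositionImageModel").getD []) "TagBoxes").getD []
      tag_boxes.foldl (fun acc tag =>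
        let name := PySem.Str.strip ((pvLookup? tag "Name").getD "")
        let comment := PySem.Str.strip ((pvLookup? tag "Comment").getD "")
        if name ≠ "" then
          let defect_type := if comment ≠ "" then comment else name
          if defect_type ≠ "" ∧ defect_type ∉ acc then acc ++ [defect_type] else acc
        else acc) defect_types
    else defect_types
  let defect_types :=
    if (pvLookup? metadata "ScanningImageModel").isSome then
      let tag_boxes := (pvLookup? ((pvLookup? metadata "ScanningImageModel").getD []) "TagBoxes").getD []
      tag_boxes.foldl (fun acc tag =>
        let name := PySem.Str.strip ((pvLookup? tag "Name").getD "")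
        let comment := PySem.Str.strip ((pvLookup? tag "Comment").getD "")
        if name ≠ "" then
          let defect_type := if comment ≠ "" then comment else name
          if defect_type ≠ "" ∧ defect_type ∉ acc then acc ++ [defect_type] else acc
        else acc) defect_types
    else defect_types
  if defect_types ≠ [] then defect_types else ["Normal"]

-- ===== PORT B =====
-- B's inner helper 'candidates': recursion over the list of model names,
-- per model a list comprehension (ported as filterMap: filter + map in one pass)
def pvCandidates (metadata : List (String × List (String × List (List (String × String))))) : List String → List String
  | [] => []
  | m :: ms =>
    let tags := (pvLookup? ((pvLookup? metadata m).getD []) "TagBoxes").getD []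
    (tags.filterMap (fun tag =>
      if PySem.Str.strip ((pvLookup? tag "Name").getD "") ≠ "" then
        let comment := PySem.Str.strip ((pvLookup? tag "Comment").getD "")
        some (if comment ≠ "" then comment else PySem.Str.strip ((pvLookup? tag "Name").getD ""))
      else none)) ++ pvCandidates metadata ms

-- B's inner helper 'uniq': sieve-style dedup — keep the head, filter its copies out of the tail, recurse
def pvUniq : List String → List String
  | [] => []
  | x :: xs => x :: pvUniq (xs.filter (fun y => y != x))
termination_by xs => xs.length
decreasing_by simpa using Nat.lt_succ_of_le (List.length_filter_le _ _)

def extract_defect_types_from_metadata_alt (metadata : List (String × List (String × List (List (String × String))))) : List String :=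
  let result := pvUniq (pvCandidates metadata ["DepositionImageModel", "ScanningImageModel"])
  if result ≠ [] then result else ["Normal"]

-- ===== PRECONDITION & SPEC =====
def Spec_extract_defect_types_from_metadata (metadata : List (String × List (String × List (List (String × String))))) (out : List String) : Prop := out = extract_defect_types_from_metadata_alt metadata
instance (metadata : List (String × List (String × List (List (String × String))))) (out : List String) : Decidable (Spec_extract_defect_types_from_metadata metadata out) := by unfold Spec_extract_defect_types_from_metadata; infer_instance

-- ===== CLAIM (what is proved, stated in full; the proofs are below) =====
def Claim_equal_extract_defect_types_from_metadata : Prop := ∀ (metadata : List (String × List (String × List (List (String × String))))), Dom_extract_defect_types_from_metadata metadata → Spec_extract_defect_types_from_metadata metadata (extract_defect_types_from_metadata metadata)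

-- ===== LEMMAS AND PROOFS =====

-- A's per-tag-box loop body, named for reasoning
def pvStepA (acc : List String) (tag : List (String × String)) : List String :=
  let name := PySem.Str.strip ((pvLookup? tag "Name").getD "")
  let comment := PySem.Str.strip ((pvLookup? tag "Comment").getD "")
  if name ≠ "" then
    let defect_type := if comment ≠ "" then comment else name
    if defect_type ≠ "" ∧ defect_type ∉ acc then acc ++ [defect_type] else acc
  else acc

-- B's per-tag value selector, named for reasoning
def pvTagVal? (tag : List (String × String)) : Option String :=
  if PySem.Str.strip ((pvLookup? tag "Name").getD "") ≠ "" then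
    let comment := PySem.Str.strip ((pvLookup? tag "Comment").getD "")
    some (if comment ≠ "" then comment else PySem.Str.strip ((pvLookup? tag "Name").getD ""))
  else none

theorem pvUniq_nil : pvUniq [] = [] := by
  rw [pvUniq.eq_def]

theorem pvUniq_cons (x : String) (xs : List String) :
    pvUniq (x :: xs) = x :: pvUniq (xs.filter (fun y => y != x)) := by
  rw [pvUniq.eq_def]

theorem pvTagBoxes_none {β : Type} (o : Option (List (String × List β)))
    (h : o.isSome = false) :
    (pvLookup? (o.getD []) "TagBoxes").getD [] = ([] : List β) := by
  cases o
  · rfl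
  · simp at h

theorem pvAddEq (acc : List String) (dt : String) (hdt : dt ≠ "") :
    (if dt ≠ "" ∧ dt ∉ acc then acc ++ [dt] else acc) = PySem.Set.add acc dt := by
  by_cases hmem : dt ∈ acc <;>
    simp [PySem.Set.add, PySem.Set.contains, hdt, hmem]

-- A's fold over a tag-box list = folding Set.add over B's selected values
theorem pvFoldA_eq (tags : List (List (String × String))) (acc : List String) :
    tags.foldl pvStepA acc = (tags.filterMap pvTagVal?).foldl PySem.Set.add acc := by
  induction tags generalizing acc with
  | nil => rfl
  | cons t ts ih =>
    simp only [List.foldl_cons, List.filterMap_cons]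
    by_cases hname : PySem.Str.strip ((pvLookup? t "Name").getD "") = ""
    · rw [show pvStepA acc t = acc by simp [pvStepA, hname],
        show pvTagVal? t = none by simp [pvTagVal?, hname]]
      exact ih acc
    · have hdt : (if PySem.Str.strip ((pvLookup? t "Comment").getD "") ≠ "" then
          PySem.Str.strip ((pvLookup? t "Comment").getD "")
        else PySem.Str.strip ((pvLookup? t "Name").getD "")) ≠ "" := by
        split
        · assumption
        · exact hname
      have hval : pvTagVal? t = some (if PySem.Str.strip ((pvLookup? t "Comment").getD "") ≠ "" then
          PySem.Str.strip ((pvLookup? t "Comment").getD "")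
        else PySem.Str.strip ((pvLookup? t "Name").getD "")) := by
        simp [pvTagVal?, hname]
      have hstep : pvStepA acc t = PySem.Set.add acc (if PySem.Str.strip ((pvLookup? t "Comment").getD "") ≠ "" then
          PySem.Str.strip ((pvLookup? t "Comment").getD "")
        else PySem.Str.strip ((pvLookup? t "Name").getD "")) := by
        simp only [pvStepA, ne_eq, hname, not_false_iff, if_true]
        exact pvAddEq acc _ hdt
      rw [hval, hstep, List.foldl_cons]
      exact ih _

-- folding Set.add = the sieve dedup of the not-yet-seen elements, appended
theorem pvFoldAdd_eq_uniq (xs : List String) (acc : List String) :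
    xs.foldl PySem.Set.add acc = acc ++ pvUniq (xs.filter (fun y => !acc.contains y)) := by
  induction xs generalizing acc with
  | nil => simp [pvUniq_nil]
  | cons x xs ih =>
    simp only [List.foldl_cons, List.filter_cons]
    by_cases hmem : x ∈ acc
    · rw [show PySem.Set.add acc x = acc by
        simp [PySem.Set.add, PySem.Set.contains, hmem]]
      simp only [List.contains_eq_mem, hmem, decide_true, Bool.not_true]
      simpa using ih acc
    · rw [show PySem.Set.add acc x = acc ++ [x] by
        simp [PySem.Set.add, PySem.Set.contains, hmem]]
      rw [ih]
      simp only [List.contains_eq_mem, hmem, decide_false, Bool.not_false]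
      rw [if_pos trivial, pvUniq_cons, List.filter_filter]
      simp only [List.append_assoc, List.cons_append, List.nil_append]
      congr 3
      apply List.filter_congr
      intro y _
      by_cases h2 : y ∈ acc <;> by_cases h3 : y = x <;>
        simp_all [List.mem_append]

-- ===== VERDICT (by name: the statement is the Claim_ definition above) =====
theorem extract_defect_types_from_metadata_spec : Claim_equal_extract_defect_types_from_metadata := by
  intro metadata _
  show _ = _
  have hcand : pvCandidates metadata ["DepositionImageModel", "ScanningImageModel"] =
      (((pvLookup? ((pvLookup? metadata "DepositionImageModel").getD []) "TagBoxes").getD []).filterMap pvTagVal?) ++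
      (((pvLookup? ((pvLookup? metadata "ScanningImageModel").getD []) "TagBoxes").getD []).filterMap pvTagVal?) := by
    simp only [pvCandidates, List.append_nil]
    rfl
  have key :
      (if (pvLookup? metadata "ScanningImageModel").isSome then
        ((pvLookup? ((pvLookup? metadata "ScanningImageModel").getD []) "TagBoxes").getD []).foldl pvStepA
          (if (pvLookup? metadata "DepositionImageModel").isSome then
            ((pvLookup? ((pvLookup? metadata "DepositionImageModel").getD []) "TagBoxes").getD []).foldl pvStepA []
          else [])
      else
        (if (pvLookup? metadata "DepositionImageModel").isSome then
          ((pvLookup? ((pvLookup? metadata "DepositionImageModel").getD []) "TagBoxes").getD []).foldl pvStepA []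
        else [])) = pvUniq (pvCandidates metadata ["DepositionImageModel", "ScanningImageModel"]) := by
    rw [hcand]
    split
    · split
      · rw [pvFoldA_eq, pvFoldA_eq, ← List.foldl_append, pvFoldAdd_eq_uniq]
        simp
      · next hd =>
        rw [pvTagBoxes_none (pvLookup? metadata "DepositionImageModel") (by simpa using hd),
          pvFoldA_eq, pvFoldAdd_eq_uniq]
        simp
    · next hs =>
      rw [pvTagBoxes_none (pvLookup? metadata "ScanningImageModel") (by simpa using hs)]
      split
      · rw [pvFoldA_eq, pvFoldAdd_eq_uniq]
        simp
      · next hd =>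
        rw [pvTagBoxes_none (pvLookup? metadata "DepositionImageModel") (by simpa using hd)]
        simp [pvUniq_nil]
  show (if (if (pvLookup? metadata "ScanningImageModel").isSome then
        ((pvLookup? ((pvLookup? metadata "ScanningImageModel").getD []) "TagBoxes").getD []).foldl pvStepA
          (if (pvLookup? metadata "DepositionImageModel").isSome then
            ((pvLookup? ((pvLookup? metadata "DepositionImageModel").getD []) "TagBoxes").getD []).foldl pvStepA []
          else [])
      else
        (if (pvLookup? metadata "DepositionImageModel").isSome then
          ((pvLookup? ((pvLookup? metadata "DepositionImageModel").getD []) "TagBoxes").getD []).foldl pvStepA []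
        else [])) ≠ [] then
      (if (pvLookup? metadata "ScanningImageModel").isSome then
        ((pvLookup? ((pvLookup? metadata "ScanningImageModel").getD []) "TagBoxes").getD []).foldl pvStepA
          (if (pvLookup? metadata "DepositionImageModel").isSome then
            ((pvLookup? ((pvLookup? metadata "DepositionImageModel").getD []) "TagBoxes").getD []).foldl pvStepA []
          else [])
      else
        (if (pvLookup? metadata "DepositionImageModel").isSome then
          ((pvLookup? ((pvLookup? metadata "DepositionImageModel").getD []) "TagBoxes").getD []).foldl pvStepA []
        else [])) else ["Normal"]) =
    (if pvUniq (pvCandidates metadata ["DepositionImageModel", "ScanningImageModel"]) ≠ [] then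
      pvUniq (pvCandidates metadata ["DepositionImageModel", "ScanningImageModel"]) else ["Normal"])
  rw [key]
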